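-- pv_equiv track=rewrite | github.com/avand35/thesis | thesis/lib/masking_functions.py | inverse_blur_string
-- ===== SOURCE A (Python) =====
-- import string
--
-- def inverse_blur_string(blurred_value: str) -> list:
--     # Ensure blurred_value is a string
--     blurred_value = str(blurred_value)
--     # Find the index of the first 'X'
--     cut = blurred_value.find("X")
--     if cut == -1:
--         # If there are no 'X' characters, return the original string
--         return [blurred_value]
--     base_value = blurred_value[:cut]
--     num_blur_fields = len(blurred_value) - cut
--     # Verify the consistency of the input
--     assert(blurred_value[cut:] == "X" * num_blur_fields)
--     # Generate all possible combinations
--     values = []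
--     for i in range(26**num_blur_fields):
--         tail = ""
--         temp = i
--         for _ in range(num_blur_fields):
--             tail = string.ascii_uppercase[temp % 26] + tail
--             temp //= 26
--         values.append(base_value + tail)
--     return values
-- ===== SOURCE B (Python) =====
-- import string
--
-- def inverse_blur_string(blurred_value: str) -> list:
--     # Ensure blurred_value is a string
--     blurred_value = str(blurred_value)
--     # Find the index of the first 'X'
--     cut = blurred_value.find("X")
--     if cut == -1:
--         return [blurred_value]
--     base_value = blurred_value[:cut]
--     num_blur_fields = len(blurred_value) - cut
--     assert(blurred_value[cut:] == "X" * num_blur_fields)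
--     # Grow the candidate strings one masked position per pass:
--     # each pass extends every candidate by every uppercase letter
--     # (last position varies fastest, matching lexicographic order).
--     values = [base_value]
--     for _ in range(num_blur_fields):
--         values = [v + c for v in values for c in string.ascii_uppercase]
--     return values
-- ===== Notes on version B (the rewrite author's own statement) =====
-- stated objective: alternative
-- what changed: Instead of counting i over range(26**num) and base-26-decoding each counter into a tail, B grows the candidate strings in num passes, each pass extending every candidate by every uppercase letter (last masked position varies fastest, so contents and order are identical).
import Mathlib
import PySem

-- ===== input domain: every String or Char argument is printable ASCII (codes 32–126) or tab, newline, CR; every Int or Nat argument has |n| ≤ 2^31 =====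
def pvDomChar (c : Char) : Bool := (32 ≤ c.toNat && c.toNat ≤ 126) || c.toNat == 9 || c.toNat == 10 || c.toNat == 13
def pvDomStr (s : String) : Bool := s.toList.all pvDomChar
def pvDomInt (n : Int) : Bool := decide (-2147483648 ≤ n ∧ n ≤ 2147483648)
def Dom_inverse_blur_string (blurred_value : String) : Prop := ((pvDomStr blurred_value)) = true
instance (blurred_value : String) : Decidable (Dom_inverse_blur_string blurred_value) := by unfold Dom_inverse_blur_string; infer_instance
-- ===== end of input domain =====

-- B replaces A's base-26 modular decoding of a counter by growing the candidate
-- strings one masked position per pass (same outputs, same order); objective: alternative.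


-- string.ascii_uppercase (shared constant)
def pvUpper : List Char :=
  ['A','B','C','D','E','F','G','H','I','J','K','L','M',
   'N','O','P','Q','R','S','T','U','V','W','X','Y','Z']

-- ===== PORT A =====
-- Literal port of A: find first 'X', then for i in range(26**num) decode i in base 26
-- (prepending digits) and append base+tail.  Python's assert raises exactly outside
-- Pre_inverse_blur_string, where no value is returned; the port does not represent it.
def inverse_blur_string (blurred_value : String) : List String :=
  let cs := blurred_value.toList
  let cut : Int := PySem.Chars.find cs ['X']
  if cut = -1 then
    [blurred_value]
  else
    let base := PySem.List.slice cs none (some cut)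
    let num : Int := PySem.List.len cs - cut
    (PySem.List.pyRange 0 ((26 : Int) ^ num.toNat) 1).foldl
      (fun values i =>
        let st := (PySem.List.pyRange 0 num 1).foldl
          (fun (st : List Char × Int) _ =>
            (PySem.List.pyGetD pvUpper (PySem.Int.mod st.2 26) 'A' :: st.1,
             PySem.Int.floordiv st.2 26))
          ([], i)
        values ++ [String.ofList (base ++ st.1)])
      []

-- ===== PORT B =====
-- Literal port of B: same prologue, then num passes, each extending every candidate
-- by every uppercase letter.
def inverse_blur_string_alt (blurred_value : String) : List String :=
  let cs := blurred_value.toList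
  let cut : Int := PySem.Chars.find cs ['X']
  if cut = -1 then
    [blurred_value]
  else
    let base := PySem.List.slice cs none (some cut)
    let num : Int := PySem.List.len cs - cut
    let values := (PySem.List.pyRange 0 num 1).foldl
      (fun (values : List (List Char)) _ =>
        values.flatMap (fun v => pvUpper.map (fun c => v ++ [c])))
      [base]
    values.map String.ofList

-- ===== PRECONDITION & SPEC =====
-- Pre_ excludes exactly the inputs where Python's assert fails (a non-'X' character after
-- the first 'X'): there BOTH Pythons raise AssertionError and return no value.
def Pre_inverse_blur_string (blurred_value : String) : Prop :=
  ((blurred_value.toList.dropWhile (fun c => c != 'X')).all (fun c => c == 'X')) = true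
instance (blurred_value : String) : Decidable (Pre_inverse_blur_string blurred_value) := by
  unfold Pre_inverse_blur_string; infer_instance

def pvWitness_inverse_blur_string : String := "abXX"

def Spec_inverse_blur_string (blurred_value : String) (out : List String) : Prop := out = inverse_blur_string_alt blurred_value
instance (blurred_value : String) (out : List String) : Decidable (Spec_inverse_blur_string blurred_value out) := by unfold Spec_inverse_blur_string; infer_instance

-- ===== CLAIM (what is proved, stated in full; the proofs are below) =====
def Claim_equal_inverse_blur_string : Prop := ∀ (blurred_value : String), Dom_inverse_blur_string blurred_value → Pre_inverse_blur_string blurred_value → Spec_inverse_blur_string blurred_value (inverse_blur_string blurred_value)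

-- ===== LEMMAS AND PROOFS =====

-- tail produced by A's inner loop for counter t over k masked positions
def pvTail : Nat → Int → List Char
  | 0, _ => []
  | k+1, t =>
      pvTail k (PySem.Int.floordiv t 26) ++ [PySem.List.pyGetD pvUpper (PySem.Int.mod t 26) 'A']

-- B's candidate suffixes after n passes (over the empty base)
def pvCombos : Nat → List (List Char)
  | 0 => [[]]
  | n+1 => (pvCombos n).flatMap (fun v => pvUpper.map (fun c => v ++ [c]))

-- A's inner loop, iterated k times, computes pvTail (digits prepended in front of the old tail)
theorem pvTail_iterate (k : Nat) (tail : List Char) (t : Int) :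
    ((fun (st : List Char × Int) =>
        (PySem.List.pyGetD pvUpper (PySem.Int.mod st.2 26) 'A' :: st.1,
         PySem.Int.floordiv st.2 26))^[k] (tail, t)).1 = pvTail k t ++ tail := by
  induction k generalizing tail t with
  | zero => simp [pvTail]
  | succ k ih =>
      rw [Function.iterate_succ_apply]
      simp only [ih, pvTail, List.append_assoc, List.cons_append, List.nil_append]

-- decoding 26*q + r for 0 ≤ r < 26 splits off q and the digit r
theorem pvTail_succ_block (n : Nat) (q r : Int) (h0 : 0 ≤ r) (h26 : r < 26) :
    pvTail (n+1) (q*26 + r) = pvTail n q ++ [PySem.List.pyGetD pvUpper r 'A'] := by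
  have hd : PySem.Int.floordiv (q*26 + r) 26 = q := by
    rw [PySem.Int.floordiv_eq_ediv_of_pos (by norm_num)]; omega
  have hm : PySem.Int.mod (q*26 + r) 26 = r := by
    rw [PySem.Int.mod_eq_emod_of_pos (by norm_num)]; omega
  simp only [pvTail]
  rw [hd, hm]

-- a window of 26 consecutive counters, shifted from range(26)
theorem pvRange_shift26 (a : Int) :
    PySem.List.pyRange a (a+26) 1 = (PySem.List.pyRange 0 26 1).map (fun r => a + r) := by
  rw [PySem.List.pyRange_one, PySem.List.pyRange_one]
  simp [List.map_map]

-- range(m*26) splits into m blocks of 26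
theorem pvRange_blocks (m : Nat) :
    PySem.List.pyRange 0 ((m : Int) * 26) 1 =
      (PySem.List.pyRange 0 (m : Int) 1).flatMap
        (fun q => (PySem.List.pyRange 0 26 1).map (fun r => q*26 + r)) := by
  induction m with
  | zero => simp [PySem.List.pyRange_one_eq_nil]
  | succ m ih =>
      have h1 : ((m+1 : Nat) : Int) * 26 = (m : Int) * 26 + 26 := by push_cast; ring
      have h2 : ((m+1 : Nat) : Int) = (m : Int) + 1 := by push_cast; ring
      rw [h1, h2,
        PySem.List.pyRange_one_append 0 ((m : Int) * 26) ((m : Int) * 26 + 26)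
          (by positivity) (by omega),
        PySem.List.pyRange_one_succ_right (by positivity), ih,
        List.flatMap_append, pvRange_shift26 ((m : Int) * 26)]
      simp

-- MAIN: A's decoded tails, in counter order, are exactly B's suffix combinations
theorem pvTail_map_range (n : Nat) :
    (PySem.List.pyRange 0 ((26 : Int) ^ n) 1).map (pvTail n) = pvCombos n := by
  induction n with
  | zero => decide
  | succ n ih =>
      have hcast : ((26 : Int) ^ (n+1)) = ((26^n : Nat) : Int) * 26 := by push_cast; ring
      rw [hcast, pvRange_blocks, List.map_flatMap]
      have hblk : ∀ q : Int,
          ((PySem.List.pyRange 0 26 1).map (fun r => q*26 + r)).map (pvTail (n+1)) =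
            pvUpper.map (fun c => pvTail n q ++ [c]) := by
        intro q
        rw [List.map_map]
        have : ∀ r ∈ PySem.List.pyRange 0 26 1,
            (pvTail (n+1) ∘ fun r => q*26 + r) r =
              ((fun c => pvTail n q ++ [c]) ∘ fun r => PySem.List.pyGetD pvUpper r 'A') r := by
          intro r hr
          rw [PySem.List.mem_pyRange_one] at hr
          simp [Function.comp, pvTail_succ_block n q r hr.1 hr.2]
        rw [List.map_congr_left this, ← List.map_map]
        have h26 : (PySem.List.pyRange 0 26 1).map (fun r => PySem.List.pyGetD pvUpper r 'A') = pvUpper := by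
          decide
        rw [h26]
      simp only [hblk]
      have : (PySem.List.pyRange 0 ((26^n : Nat) : Int) 1).flatMap
            (fun q => pvUpper.map (fun c => pvTail n q ++ [c])) =
          ((PySem.List.pyRange 0 ((26^n : Nat) : Int) 1).map (pvTail n)).flatMap
            (fun v => pvUpper.map (fun c => v ++ [c])) := by
        rw [List.flatMap_map]
      rw [this]
      have hc : ((26^n : Nat) : Int) = (26 : Int) ^ n := by push_cast; ring
      rw [hc, ih]
      rfl

-- B's pass, iterated n times from [base], is pvCombos n with base prepended
theorem pvCombos_iterate (n : Nat) (base : List Char) :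
    ((fun (values : List (List Char)) =>
        values.flatMap (fun v => pvUpper.map (fun c => v ++ [c])))^[n] [base]) =
      (pvCombos n).map (fun w => base ++ w) := by
  induction n with
  | zero => simp [pvCombos]
  | succ n ih =>
      rw [Function.iterate_succ_apply', ih]
      simp [pvCombos, List.flatMap_map, List.map_flatMap, List.map_map, Function.comp_def]

-- ===== VERDICT (by name: the statement is the Claim_ definition above) =====
theorem inverse_blur_string_spec : Claim_equal_inverse_blur_string := by
  intro bv _ _
  unfold Spec_inverse_blur_string inverse_blur_string inverse_blur_string_alt
  by_cases h : PySem.Chars.find bv.toList ['X'] = -1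
  · simp [h]
  · simp only [h, if_false]
    set cut := PySem.Chars.find bv.toList ['X'] with hcut
    set base := PySem.List.slice bv.toList none (some cut) with hbase
    set num : Int := PySem.List.len bv.toList - cut with hnum
    set n : Nat := num.toNat with hn
    -- reduce both counter-ignoring foldls to iterates of length n
    have hlen : (PySem.List.pyRange 0 num 1).length = n := by
      rw [PySem.List.length_pyRange_one]; omega
    rw [PySem.List.foldl_append_singleton_eq_map, List.foldl_const, hlen,
      pvCombos_iterate]
    have hA : (PySem.List.pyRange 0 ((26 : Int) ^ n) 1).map
          (fun i => String.ofList (base ++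
            ((PySem.List.pyRange 0 num 1).foldl
              (fun (st : List Char × Int) _ =>
                (PySem.List.pyGetD pvUpper (PySem.Int.mod st.2 26) 'A' :: st.1,
                 PySem.Int.floordiv st.2 26)) ([], i)).1)) =
        (PySem.List.pyRange 0 ((26 : Int) ^ n) 1).map
          (fun i => String.ofList (base ++ pvTail n i)) := by
      refine List.map_congr_left (fun i _ => ?_)
      rw [List.foldl_const, hlen, pvTail_iterate]
      simp
    rw [hA, ← pvTail_map_range n]
    simp [List.map_map, Function.comp_def]
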